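-- pv_equiv track=rewrite | github.com/saikeerthiambati/Smart-Email-Classifier | src/category.py | assign_urgency
-- ===== SOURCE A (Python) =====
-- def assign_urgency(text, category):
--     text = str(text).lower()
--
--     # Base urgency from category
--     if category.lower() == "complaint":
--         urgency = "High"
--     elif category.lower() == "request":
--         urgency = "Medium"
--     else:
--         urgency = "Low"
--
--     # Keyword-based escalation
--     high_keywords = [
--         "urgent", "asap", "immediately",
--         "not working", "down", "failed",
--         "error", "critical"
--     ]
--
--     medium_keywords = [
--         "please check", "follow up",
--         "by today", "by tomorrow"
--     ]
--
--     for word in high_keywords: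
--         if word in text:
--             return "High"
--
--     for word in medium_keywords:
--         if word in text and urgency != "High":
--             return "Medium"
--
--     return urgency
-- ===== SOURCE B (Python) =====
-- HIGH_KEYWORDS = (
--     "urgent", "asap", "immediately",
--     "not working", "down", "failed",
--     "error", "critical"
-- )
--
-- MEDIUM_KEYWORDS = (
--     "please check", "follow up",
--     "by today", "by tomorrow"
-- )
--
-- CATEGORY_LEVEL = {"complaint": 3, "request": 2}
-- LABELS = ("Low", "Medium", "High")
--
--
-- def assign_urgency(text, category):
--     # Single left-to-right sweep over the text: at each position take the
--     # level of the best keyword starting there, keep a running maximum.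
--     t = str(text).lower()
--     level = CATEGORY_LEVEL.get(category.lower(), 1)
--     for i in range(len(t)):
--         if t.startswith(HIGH_KEYWORDS, i):
--             level = max(level, 3)
--         elif t.startswith(MEDIUM_KEYWORDS, i):
--             level = max(level, 2)
--     return LABELS[level - 1]
-- ===== Notes on version B (the rewrite author's own statement) =====
-- stated objective: alternative
-- what changed: Replaces A's keyword-driven 'in' scans with early returns by a single text-driven sweep: one pass over the character positions of the lowered text keeps a running maximum level of any keyword that starts at each position, combined with a category level from a table and mapped through a level->label tuple.
import Mathlib
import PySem

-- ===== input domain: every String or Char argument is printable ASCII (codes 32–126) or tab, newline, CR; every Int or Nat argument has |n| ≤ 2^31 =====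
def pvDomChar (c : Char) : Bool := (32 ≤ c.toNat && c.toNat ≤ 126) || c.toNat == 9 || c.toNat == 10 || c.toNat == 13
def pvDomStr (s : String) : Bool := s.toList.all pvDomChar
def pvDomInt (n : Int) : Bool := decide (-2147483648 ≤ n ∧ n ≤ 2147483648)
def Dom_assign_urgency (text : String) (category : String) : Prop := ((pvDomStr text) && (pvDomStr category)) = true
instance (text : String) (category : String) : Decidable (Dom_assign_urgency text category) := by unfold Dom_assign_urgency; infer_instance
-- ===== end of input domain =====

-- B replaces A's keyword-driven substring scans + early returns by a single sweep over text
-- positions with a running maximum level; same cost, a different traversal of the data.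

-- ===== PORT A =====
def high_keywords : List String :=
  ["urgent", "asap", "immediately", "not working", "down", "failed", "error", "critical"]

def medium_keywords : List String :=
  ["please check", "follow up", "by today", "by tomorrow"]

def assign_urgency (text : String) (category : String) : String :=
  let t := PySem.Str.lower text
  let urgency :=
    if PySem.Str.lower category == "complaint" then "High"
    else if PySem.Str.lower category == "request" then "Medium"
    else "Low"
  -- 'for word in …: if …: return …' as an any-scan over the same list, same order
  if high_keywords.any (fun word => PySem.Str.isIn word t) then "High"
  else if medium_keywords.any (fun word => PySem.Str.isIn word t && urgency != "High") then "Medium"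
  else urgency

-- ===== PORT B =====
def HIGH_KEYWORDS : List (List Char) :=
  ["urgent", "asap", "immediately", "not working", "down", "failed", "error", "critical"].map String.toList

def MEDIUM_KEYWORDS : List (List Char) :=
  ["please check", "follow up", "by today", "by tomorrow"].map String.toList

def CATEGORY_LEVEL : PySem.Dict String Int := PySem.Dict.ofList [("complaint", 3), ("request", 2)]

def LABELS : List String := ["Low", "Medium", "High"]

-- one step of the sweep: 't.startswith(TUPLE, i)' is an any-scan of startswith on t.drop i
-- (exact for 0 ≤ i, the only i a range(len(t)) loop produces)
def pvStep (t : List Char) (lv : Int) (i : Nat) : Int :=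
  if HIGH_KEYWORDS.any (fun k => PySem.Chars.startswith (t.drop i) k) then max lv 3
  else if MEDIUM_KEYWORDS.any (fun k => PySem.Chars.startswith (t.drop i) k) then max lv 2
  else lv

def assign_urgency_alt (text : String) (category : String) : String :=
  let t := (PySem.Str.lower text).toList
  let base := CATEGORY_LEVEL.getD (PySem.Str.lower category) 1
  -- 'for i in range(len(t)):' — indices 0..len-1, all nonnegative, so List.range is exact
  let level := (List.range t.length).foldl (pvStep t) base
  -- LABELS[level - 1]; total here since level ∈ {1,2,3}
  (PySem.List.pyGet? LABELS (level - 1)).getD ""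

-- ===== PRECONDITION & SPEC =====
def Spec_assign_urgency (text : String) (category : String) (out : String) : Prop := out = assign_urgency_alt text category
instance (text : String) (category : String) (out : String) : Decidable (Spec_assign_urgency text category out) := by unfold Spec_assign_urgency; infer_instance

-- ===== CLAIM (what is proved, stated in full; the proofs are below) =====
def Claim_equal_assign_urgency : Prop := ∀ (text : String) (category : String), Dom_assign_urgency text category → Spec_assign_urgency text category (assign_urgency text category)

-- ===== LEMMAS AND PROOFS =====

-- the level the whole suffix-set of t contributes
def pvGlob (t : List Char) : Int :=
  if HIGH_KEYWORDS.any (fun k => PySem.Chars.isIn k t) then 3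
  else if MEDIUM_KEYWORDS.any (fun k => PySem.Chars.isIn k t) then 2
  else 1

-- structural-recursion equivalent of the index sweep
def pvBest : List Char → Int → Int
  | [], lv => lv
  | c :: cs, lv => pvBest cs (pvStep (c :: cs) lv 0)

theorem pvFold_eq_best (t : List Char) (lv : Int) :
    (List.range t.length).foldl (pvStep t) lv = pvBest t lv := by
  induction t generalizing lv with
  | nil => simp [pvBest]
  | cons c cs ih =>
    rw [List.length_cons, List.range_succ_eq_map, List.foldl_cons, List.foldl_map, pvBest,
      ← ih (pvStep (c :: cs) lv 0)]
    congr 1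

theorem isIn_cons (k : List Char) (c : Char) (cs : List Char) :
    PySem.Chars.isIn k (c :: cs) =
      (PySem.Chars.startswith (c :: cs) k || PySem.Chars.isIn k cs) := by
  rcases h : PySem.Chars.isIn k (c :: cs) with _ | _
  · rw [PySem.Chars.isIn_eq_false_iff] at h
    symm
    rw [Bool.or_eq_false_iff]
    constructor
    · rw [← Bool.not_eq_true, PySem.Chars.startswith_iff]
      exact fun hp => h hp.isInfix
    · rw [PySem.Chars.isIn_eq_false_iff]
      exact fun hi => h (hi.trans (List.suffix_cons c cs).isInfix)
  · rw [PySem.Chars.isIn_iff_infix, List.infix_cons_iff] at h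
    symm
    rw [Bool.or_eq_true]
    rcases h with h | h
    · exact Or.inl (PySem.Chars.startswith_iff _ _ |>.mpr h)
    · exact Or.inr (PySem.Chars.isIn_iff_infix _ _ |>.mpr h)

theorem any_isIn_cons (ks : List (List Char)) (c : Char) (cs : List Char) :
    ks.any (fun k => PySem.Chars.isIn k (c :: cs))
      = (ks.any (fun k => PySem.Chars.startswith (c :: cs) k)
          || ks.any (fun k => PySem.Chars.isIn k cs)) := by
  induction ks with
  | nil => rfl
  | cons a as ih =>
    rw [List.any_cons, ih, isIn_cons, List.any_cons, List.any_cons]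
    cases PySem.Chars.startswith (c :: cs) a <;>
    cases PySem.Chars.isIn a cs <;>
    cases as.any (fun k => PySem.Chars.startswith (c :: cs) k) <;>
    cases as.any (fun k => PySem.Chars.isIn k cs) <;> rfl

theorem pvGlob_cons (c : Char) (cs : List Char) :
    pvGlob (c :: cs) = max (pvStep (c :: cs) 1 0) (pvGlob cs) := by
  simp only [pvGlob, pvStep, List.drop_zero, any_isIn_cons]
  by_cases h3s : HIGH_KEYWORDS.any (fun k => PySem.Chars.startswith (c :: cs) k) = true <;>
  by_cases h3r : HIGH_KEYWORDS.any (fun k => PySem.Chars.isIn k cs) = true <;>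
  by_cases h2s : MEDIUM_KEYWORDS.any (fun k => PySem.Chars.startswith (c :: cs) k) = true <;>
  by_cases h2r : MEDIUM_KEYWORDS.any (fun k => PySem.Chars.isIn k cs) = true <;>
  simp only [Bool.not_eq_true] at h3s h3r h2s h2r ⊢ <;>
  simp [h3s, h3r, h2s, h2r]

theorem pvBest_eq_max (t : List Char) (lv : Int) (hlv : 1 ≤ lv) :
    pvBest t lv = max lv (pvGlob t) := by
  induction t generalizing lv with
  | nil =>
    have h : pvGlob [] = 1 := by decide
    rw [pvBest, h]
    omega
  | cons c cs ih =>
    have h1 : (1 : Int) ≤ pvStep (c :: cs) lv 0 := by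
      simp only [pvStep]; split_ifs <;> omega
    have hs : pvStep (c :: cs) lv 0 = max lv (pvStep (c :: cs) 1 0) := by
      simp only [pvStep]; split_ifs <;> omega
    rw [pvBest, ih _ h1, pvGlob_cons, hs]
    omega

theorem catLevel_getD (s : String) :
    CATEGORY_LEVEL.getD s 1 = if s = "complaint" then 3 else if s = "request" then 2 else 1 := by
  by_cases h1 : s = "complaint"
  · subst h1; decide
  by_cases h2 : s = "request"
  · subst h2; decide
  have b1 : ("complaint" == s) = false := by
    simp only [beq_eq_false_iff_ne, ne_eq]; exact fun h => h1 h.symm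
  have b2 : ("request" == s) = false := by
    simp only [beq_eq_false_iff_ne, ne_eq]; exact fun h => h2 h.symm
  have hi : CATEGORY_LEVEL.items = [("complaint", (3 : Int)), ("request", 2)] := by decide
  simp [PySem.Dict.getD, PySem.Dict.get?, hi, List.find?, b1, b2, h1, h2]

-- ===== VERDICT (by name: the statement is the Claim_ definition above) =====
set_option maxHeartbeats 1000000 in
theorem assign_urgency_spec : Claim_equal_assign_urgency := by
  intro text category _
  unfold Spec_assign_urgency assign_urgency assign_urgency_alt
  simp only [pvFold_eq_best, catLevel_getD, beq_iff_eq]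
  have hmap3 : (∃ w ∈ high_keywords, PySem.Chars.isIn w.toList (PySem.Chars.lower text.toList) = true)
      ↔ (∃ x ∈ HIGH_KEYWORDS, PySem.Chars.isIn x (PySem.Chars.lower text.toList) = true) := by
    simp [HIGH_KEYWORDS, high_keywords]
  have hmap2 : (∃ w ∈ medium_keywords, PySem.Chars.isIn w.toList (PySem.Chars.lower text.toList) = true)
      ↔ (∃ x ∈ MEDIUM_KEYWORDS, PySem.Chars.isIn x (PySem.Chars.lower text.toList) = true) := by
    simp [MEDIUM_KEYWORDS, medium_keywords]
  rw [pvBest_eq_max _ _ (by split_ifs <;> omega)]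
  by_cases hc : PySem.Str.lower category = "complaint" <;>
  by_cases hr : PySem.Str.lower category = "request" <;>
  by_cases h3 : ∃ x ∈ HIGH_KEYWORDS, PySem.Chars.isIn x (PySem.Chars.lower text.toList) = true <;>
  by_cases h2 : ∃ x ∈ MEDIUM_KEYWORDS, PySem.Chars.isIn x (PySem.Chars.lower text.toList) = true <;>
  first
    | exact absurd (hc.symm.trans hr) (by decide)
    | simp [hc, hr, h3, h2, hmap3, hmap2, pvGlob, PySem.List.pyGet?, PySem.List.pyIdx?, LABELS]
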